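-- pv_equiv track=rewrite | github.com/AayushSabharwal/Python-Backup | Tier 3/Path In Grid/BestPathGrid.py | SPath
-- ===== SOURCE A (Python) =====
-- def SPath(n):
--     cx = 0
--     cy = 0
--     path = []
--     xincr = 1
--     while(len(path) < n*n):
--         path.append((cx, cy))
--         cx = cx + xincr
--         if(cx == n-1 or cx == 0):
--             path.append((cx, cy))
--             cy = cy +1
--             xincr = -xincr
--
--     return path
-- ===== SOURCE B (Python) =====
-- def SPath(n):
--     return [(x, y)
--             for y in range(n)
--             for x in (range(n) if y % 2 == 0 else range(n - 1, -1, -1))]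
-- ===== Notes on version B (the rewrite author's own statement) =====
-- stated objective: simpler
-- what changed: Replaces the stateful while-loop with direction flag, boundary test and double append by a nested comprehension: row y sweeps x ascending for even y and descending for odd y.
-- outside the precondition, e.g. on SPath(-2): A returns [(0, 0), (1, 0), (2, 0), (3, 0)], B returns []
import Mathlib
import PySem

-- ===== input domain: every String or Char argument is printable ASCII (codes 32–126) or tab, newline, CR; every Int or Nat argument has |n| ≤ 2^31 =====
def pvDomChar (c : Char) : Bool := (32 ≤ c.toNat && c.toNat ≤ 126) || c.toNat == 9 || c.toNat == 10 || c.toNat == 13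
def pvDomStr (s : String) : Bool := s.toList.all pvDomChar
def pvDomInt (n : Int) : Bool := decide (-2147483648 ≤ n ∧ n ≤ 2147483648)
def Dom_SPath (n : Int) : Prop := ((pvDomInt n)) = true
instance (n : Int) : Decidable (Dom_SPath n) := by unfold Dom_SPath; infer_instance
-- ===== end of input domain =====

-- B replaces A's stateful while-loop (direction flag, boundary test, double append)
-- with a nested comprehension: row y sweeps x ascending for even y, descending for odd y.
-- Same boustrophedon path, simpler decomposition.

-- ===== PORT A =====
-- while-loop of A as fuel recursion; each iteration appends ≥ 1 point and the loop
-- runs while len(path) < n*n, so (n*n).toNat fuel is exact (fuel exhaustion coincides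
-- with the condition turning false).
def SPathLoop (n : Int) (fuel : Nat) (cx cy xincr : Int) (path : List (Int × Int)) :
    List (Int × Int) :=
  match fuel with
  | 0 => path
  | f + 1 =>
    if (path.length : Int) < n * n then
      if cx + xincr = n - 1 ∨ cx + xincr = 0 then
        SPathLoop n f (cx + xincr) (cy + 1) (-xincr) ((path ++ [(cx, cy)]) ++ [(cx + xincr, cy)])
      else
        SPathLoop n f (cx + xincr) cy xincr (path ++ [(cx, cy)])
    else path

def SPath (n : Int) : List (Int × Int) :=
  SPathLoop n (n * n).toNat 0 0 1 []

-- ===== PORT B =====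
def SPath_alt (n : Int) : List (Int × Int) :=
  (PySem.List.pyRange 0 n 1).flatMap (fun y =>
    (if PySem.Int.mod y 2 = 0 then PySem.List.pyRange 0 n 1
     else PySem.List.pyRange (n - 1) (-1) (-1)).map (fun x => (x, y)))

-- ===== PRECONDITION & SPEC =====
-- Pre_ excludes negative n, which is not a grid size: there A's loop never meets a
-- boundary and returns an accidental straight line of n*n points (x,0), while B
-- naturally returns []; this degenerate corner is an artefact nobody would specify.
def Pre_SPath (n : Int) : Prop := 0 ≤ n
instance (n : Int) : Decidable (Pre_SPath n) := by unfold Pre_SPath; infer_instance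
def pvWitness_SPath : Int := (3)

def Spec_SPath (n : Int) (out : List (Int × Int)) : Prop := out = SPath_alt n
instance (n : Int) (out : List (Int × Int)) : Decidable (Spec_SPath n out) := by
  unfold Spec_SPath; infer_instance

-- ===== CLAIM (what is proved, stated in full; the proofs are below) =====
def Claim_equal_SPath : Prop := ∀ (n : Int), Dom_SPath n → Pre_SPath n → Spec_SPath n (SPath n)

-- ===== LEMMAS AND PROOFS =====

-- When the loop condition is already false, the loop returns the path unchanged.
lemma SPathLoop_done (n : Int) (fuel : Nat) (cx cy xincr : Int) (path : List (Int × Int))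
    (h : ¬ ((path.length : Int) < n * n)) :
    SPathLoop n fuel cx cy xincr path = path := by
  cases fuel with
  | zero => rfl
  | succ f => simp [SPathLoop, h]

-- Even (left-to-right) row: from cx = n-1-j the loop appends (n-1-j,cy) … (n-1,cy)
-- in j iterations and lands at the start state of the next (right-to-left) row.
lemma SPath_inF (n : Int) (hn : 2 ≤ n) :
    ∀ (j : Nat) (f : Nat) (cy : Int) (path : List (Int × Int)),
      1 ≤ j → (j : Int) ≤ n - 1 →
      (path.length : Int) = cy * n + (n - 1 - j) →
      cy * n + n ≤ n * n →
      SPathLoop n (j + f) (n - 1 - j) cy 1 path =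
        SPathLoop n f (n - 1) (cy + 1) (-1)
          (path ++ (PySem.List.pyRange (n - 1 - j) n 1).map (fun x => (x, cy))) := by
  intro j
  induction j with
  | zero => intro f cy path h1 _ _ _; omega
  | succ j ih =>
    intro f cy path _ hj hlen hrow
    have hjz : (0:Int) ≤ (j:Int) := Int.natCast_nonneg j
    have hc : ((j+1:Nat):Int) = (j:Int)+1 := by push_cast; ring
    rw [hc] at hj hlen ⊢
    have hlt : (path.length : Int) < n * n := by rw [hlen]; linarith
    rw [show j + 1 + f = (j + f) + 1 from by omega]
    simp only [SPathLoop]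
    rw [if_pos hlt]
    split_ifs with hb
    · -- boundary reached: only possible when j = 0
      obtain rfl : j = 0 := by
        rcases hb with h | h
        · omega
        · omega
      have e1 : n - 1 - (((0:Nat):Int) + 1) + 1 = n - 1 := by push_cast; ring
      have e2 : n - 1 - (((0:Nat):Int) + 1) = n - 2 := by push_cast; ring
      rw [e1, e2]
      have e3 : PySem.List.pyRange (n - 2) n 1 = (n - 2) :: PySem.List.pyRange (n - 1) n 1 := by
        rw [PySem.List.pyRange_one_cons (by omega)]
        congr 1
        ring
      have e4 : PySem.List.pyRange (n - 1) n 1 = [n - 1] := by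
        rw [PySem.List.pyRange_one_cons (by omega), PySem.List.pyRange_one_eq_nil (by omega)]
      rw [e3, e4]
      simp
    · -- interior step
      push_neg at hb
      have hjpos : 1 ≤ j := by omega
      have e1 : n - 1 - ((j:Int) + 1) + 1 = n - 1 - (j:Int) := by ring
      rw [e1]
      rw [ih f cy (path ++ [(n - 1 - ((j:Int) + 1), cy)]) hjpos (by omega)
        (by simp only [List.length_append, List.length_cons, List.length_nil]
            push_cast
            rw [hlen]; ring) hrow]
      rw [PySem.List.pyRange_one_cons (show n - 1 - ((j:Int) + 1) < n by omega), e1]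
      simp

-- Odd (right-to-left) row: from cx = j the loop appends (j,cy) … (0,cy)
-- in j iterations and lands at the start state of the next (left-to-right) row.
lemma SPath_inB (n : Int) (hn : 2 ≤ n) :
    ∀ (j : Nat) (f : Nat) (cy : Int) (path : List (Int × Int)),
      1 ≤ j → (j : Int) ≤ n - 1 →
      (path.length : Int) = cy * n + (n - 1 - j) →
      cy * n + n ≤ n * n →
      SPathLoop n (j + f) (j : Int) cy (-1) path =
        SPathLoop n f 0 (cy + 1) 1
          (path ++ (PySem.List.pyRange (j : Int) (-1) (-1)).map (fun x => (x, cy))) := by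
  intro j
  induction j with
  | zero => intro f cy path h1 _ _ _; omega
  | succ j ih =>
    intro f cy path _ hj hlen hrow
    have hjz : (0:Int) ≤ (j:Int) := Int.natCast_nonneg j
    have hc : ((j+1:Nat):Int) = (j:Int)+1 := by push_cast; ring
    rw [hc] at hj hlen ⊢
    have hlt : (path.length : Int) < n * n := by rw [hlen]; linarith
    rw [show j + 1 + f = (j + f) + 1 from by omega]
    simp only [SPathLoop]
    rw [if_pos hlt]
    split_ifs with hb
    · -- boundary reached: only possible when j = 0
      obtain rfl : j = 0 := by
        rcases hb with h | h
        · omega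
        · omega
      have e1 : (((0:Nat):Int) + 1) + (-1) = 0 := by omega
      have e2 : (((0:Nat):Int) + 1) = 1 := by omega
      rw [e1, e2]
      have e3 : PySem.List.pyRange (1:Int) (-1) (-1) = (1:Int) :: PySem.List.pyRange 0 (-1) (-1) := by
        rw [PySem.List.pyRange_neg_one_cons (by omega)]
        norm_num
      have e4 : PySem.List.pyRange (0:Int) (-1) (-1) = [0] := by
        rw [PySem.List.pyRange_neg_one_cons (by omega), PySem.List.pyRange_neg_one_eq_nil (by omega)]
      rw [e3, e4]
      norm_num
    · -- interior step
      push_neg at hb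
      have hjpos : 1 ≤ j := by omega
      have e1 : ((j:Int) + 1) + (-1) = (j:Int) := by ring
      rw [e1]
      rw [ih f cy (path ++ [((j:Int) + 1, cy)]) hjpos (by omega)
        (by simp only [List.length_append, List.length_cons, List.length_nil]
            push_cast
            rw [hlen]; ring) hrow]
      rw [PySem.List.pyRange_neg_one_cons (show (-1:Int) < (j:Int) + 1 by omega)]
      rw [show (j:Int) + 1 - 1 = (j:Int) from by ring]
      simp

-- Outer induction over the k remaining rows (cy = n - k), alternating direction
-- by the parity of cy.
lemma SPath_outer (n : Int) (hn : 2 ≤ n) :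
    ∀ (k : Nat) (f : Nat) (path : List (Int × Int)) (cy : Int),
      cy = n - k → 0 ≤ cy →
      (path.length : Int) = cy * n →
      SPathLoop n (k * (n-1).toNat + f) (if cy % 2 = 0 then 0 else n - 1) cy
          (if cy % 2 = 0 then 1 else -1) path
        = path ++ (PySem.List.pyRange cy n 1).flatMap (fun y =>
            (if PySem.Int.mod y 2 = 0 then PySem.List.pyRange 0 n 1
             else PySem.List.pyRange (n - 1) (-1) (-1)).map (fun x => (x, y))) := by
  intro k
  induction k with
  | zero =>
    intro f path cy hcy _ hlen
    have hcyn : cy = n := by omega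
    rw [hcyn] at hlen ⊢
    rw [PySem.List.pyRange_one_eq_nil (le_refl n)]
    rw [SPathLoop_done n _ _ _ _ _ (by simp [hlen])]
    simp
  | succ k ih =>
    intro f path cy hcy hcy0 hlen
    have hcylt : cy < n := by omega
    have hm : (((n-1).toNat : Nat) : Int) = n - 1 := Int.toNat_of_nonneg (by omega)
    have hrow : cy * n + n ≤ n * n := by nlinarith
    have hmod : PySem.Int.mod cy 2 = cy % 2 := PySem.Int.mod_eq_emod_of_pos (by omega)
    rw [show (k+1) * (n-1).toNat + f = (n-1).toNat + (k * (n-1).toNat + f) from by ring]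
    rw [PySem.List.pyRange_one_cons hcylt]
    simp only [List.flatMap_cons]
    rcases Int.emod_two_eq_zero_or_one cy with hpar | hpar
    · -- even row: left to right
      rw [if_pos hpar, if_pos hpar]
      have hstep := SPath_inF n hn (n-1).toNat (k * (n-1).toNat + f) cy path
        (by omega) (by omega) (by rw [hlen, hm]; ring) hrow
      rw [show n - 1 - (((n-1).toNat : Nat) : Int) = 0 from by omega] at hstep
      rw [hstep]
      have hnext := ih f (path ++ (PySem.List.pyRange 0 n 1).map (fun x => (x, cy))) (cy+1)
        (by omega) (by omega)
        (by simp only [List.length_append, List.length_map, PySem.List.length_pyRange_one]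
            rw [Nat.cast_add, hlen, show (((n - 0).toNat : Nat) : Int) = n from by omega]
            ring)
      rw [if_neg (show ¬ ((cy+1) % 2 = 0) from by omega),
          if_neg (show ¬ ((cy+1) % 2 = 0) from by omega)] at hnext
      rw [hnext, hmod, if_pos hpar]
      simp
    · -- odd row: right to left
      rw [if_neg (show ¬ (cy % 2 = 0) from by omega), if_neg (show ¬ (cy % 2 = 0) from by omega)]
      have hstep := SPath_inB n hn (n-1).toNat (k * (n-1).toNat + f) cy path
        (by omega) (by omega) (by rw [hlen, hm]; ring) hrow
      rw [hm] at hstep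
      rw [hstep]
      have hnext := ih f (path ++ (PySem.List.pyRange (n-1) (-1) (-1)).map (fun x => (x, cy))) (cy+1)
        (by omega) (by omega)
        (by simp only [List.length_append, List.length_map, PySem.List.length_pyRange_neg_one]
            rw [Nat.cast_add, hlen, show (((n - 1 - (-1)).toNat : Nat) : Int) = n from by omega]
            ring)
      rw [if_pos (show (cy+1) % 2 = 0 from by omega),
          if_pos (show (cy+1) % 2 = 0 from by omega)] at hnext
      rw [hnext, hmod, if_neg (show ¬ (cy % 2 = 0) from by omega)]
      simp

-- ===== VERDICT (by name: the statement is the Claim_ definition above) =====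
theorem SPath_spec : Claim_equal_SPath := by
  intro n _ hpre
  unfold Spec_SPath
  have h0 : (0:Int) ≤ n := hpre
  rcases lt_or_ge n 2 with h2 | h2
  · interval_cases n
    · decide
    · decide
  · obtain ⟨a, rfl⟩ : ∃ a : Nat, n = (a : Int) := ⟨n.toNat, (Int.toNat_of_nonneg h0).symm⟩
    have hfuel : ((a:Int) * (a:Int)).toNat
        = a * ((a:Int)-1).toNat + (a * a - a * ((a:Int)-1).toNat) := by
      have h1 : ((a:Int) * (a:Int)).toNat = a * a := by
        rw [← Nat.cast_mul, Int.toNat_natCast]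
      have h2' : ((a:Int)-1).toNat = a - 1 := by omega
      have h3 : a * (a - 1) ≤ a * a := Nat.mul_le_mul_left a (by omega)
      rw [h1, h2']
      exact (Nat.add_sub_cancel' h3).symm
    have hout := SPath_outer (a:Int) h2 a (a * a - a * ((a:Int)-1).toNat) [] 0
      (by omega) (le_refl 0) (by simp)
    rw [if_pos (show (0:Int) % 2 = 0 from by decide),
        if_pos (show (0:Int) % 2 = 0 from by decide)] at hout
    unfold SPath SPath_alt
    rw [hfuel, hout]
    simp
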